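-- pv_equiv track=rewrite | github.com/kamilGie/WDI | Zestaw_3:_Tablice_o_większej_liczbie_wymiarów/109/rozwiazanie109.py | Zadanie_109
-- ===== SOURCE A (Python) =====
-- def Zadanie_109(tab):
--     n = len(tab)
--     res = suma = 0
--
--     for y in range(n):
--         for x in range(n):
--             for i in range(1, 11):
--
--                 if i + y < n:
--                     suma = 0
--                     for j in range(y, i + y + 1):
--                         suma += tab[j][x]
--                     res = max(res, suma)
--
--                 if i + x < n:
--                     suma = 0
--                     for j in range(x, i + x + 1):
--                         suma += tab[y][j]
--                     res = max(res, suma)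
--     return res
-- ===== SOURCE B (Python) =====
-- def Zadanie_109(tab):
--     n = len(tab)
--     rows = [[tab[y][x] for x in range(n)] for y in range(n)]
--     cols = [[tab[y][x] for y in range(n)] for x in range(n)]
--     best = 0
--     for line in rows + cols:
--         pref = [0]
--         for v in line:
--             pref.append(pref[-1] + v)
--         for s in range(n):
--             for i in range(1, 11):
--                 if s + i < n:
--                     best = max(best, pref[s + i + 1] - pref[s])
--     return best
-- ===== Notes on version B (the rewrite author's own statement) =====
-- stated objective: faster
-- what changed: B transposes the grid once and computes one prefix-sum array per row/column, so each window sum is a single prefix difference instead of A's re-summing loop; Pre_ excludes ragged grids (a row shorter than the number of rows), on which A raises IndexError for n>=2 but returns 0 unread in the degenerate n<=1 case, where B's eager transpose raises.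
-- outside the precondition, e.g. on Zadanie_109([[]]): A returns 0, B raises IndexError
import Mathlib
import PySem

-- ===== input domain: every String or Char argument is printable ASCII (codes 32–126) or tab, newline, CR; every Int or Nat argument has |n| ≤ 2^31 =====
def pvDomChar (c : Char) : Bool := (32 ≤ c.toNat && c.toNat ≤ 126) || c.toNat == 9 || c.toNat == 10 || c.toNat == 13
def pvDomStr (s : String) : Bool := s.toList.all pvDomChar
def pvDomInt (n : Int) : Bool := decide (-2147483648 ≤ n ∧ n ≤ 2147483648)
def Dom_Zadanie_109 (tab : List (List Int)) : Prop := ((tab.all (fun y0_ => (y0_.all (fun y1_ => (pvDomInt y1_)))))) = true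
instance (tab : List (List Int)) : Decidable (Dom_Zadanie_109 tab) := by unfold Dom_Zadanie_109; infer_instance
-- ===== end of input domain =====

-- B replaces A's re-summation of every row/column window by one prefix-sum pass per line (transposed for columns);
-- same result, fewer additions per window (objective: faster by a constant factor).

-- ===== PORT A =====
def Zadanie_109 (tab : List (List Int)) : Int :=
  let n : Int := tab.length
  (PySem.List.pyRange 0 n 1).foldl (fun res y =>
    (PySem.List.pyRange 0 n 1).foldl (fun res x =>
      (PySem.List.pyRange 1 11 1).foldl (fun res i =>
        let res1 := if i + y < n then
            max res ((PySem.List.pyRange y (i + y + 1) 1).foldl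
              (fun suma j => suma + PySem.List.pyGetD (PySem.List.pyGetD tab j []) x 0) 0)
          else res
        if i + x < n then
            max res1 ((PySem.List.pyRange x (i + x + 1) 1).foldl
              (fun suma j => suma + PySem.List.pyGetD (PySem.List.pyGetD tab y []) j 0) 0)
          else res1) res) res) 0

-- ===== PORT B =====
def Zadanie_109_alt (tab : List (List Int)) : Int :=
  let n : Int := tab.length
  let rows := (PySem.List.pyRange 0 n 1).map (fun y =>
    (PySem.List.pyRange 0 n 1).map (fun x => PySem.List.pyGetD (PySem.List.pyGetD tab y []) x 0))
  let cols := (PySem.List.pyRange 0 n 1).map (fun x =>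
    (PySem.List.pyRange 0 n 1).map (fun y => PySem.List.pyGetD (PySem.List.pyGetD tab y []) x 0))
  (rows ++ cols).foldl (fun best line =>
    let pref := line.foldl (fun pref v => pref ++ [PySem.List.pyGetD pref (-1) 0 + v]) [0]
    (PySem.List.pyRange 0 n 1).foldl (fun best s =>
      (PySem.List.pyRange 1 11 1).foldl (fun best i =>
        if s + i < n then
          max best (PySem.List.pyGetD pref (s + i + 1) 0 - PySem.List.pyGetD pref s 0)
        else best) best) best) 0

-- ===== PRECONDITION & SPEC =====
-- Pre_ excludes ragged grids (a row shorter than the number of rows): Python A raises IndexError on them for n >= 2,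
-- and in the degenerate n <= 1 case A returns 0 without ever reading the short row while B's eager transpose raises.
def Pre_Zadanie_109 (tab : List (List Int)) : Prop := ∀ r ∈ tab, tab.length ≤ r.length
instance (tab : List (List Int)) : Decidable (Pre_Zadanie_109 tab) := by unfold Pre_Zadanie_109; infer_instance
def pvWitness_Zadanie_109 : List (List Int) := [[1, -2, 3], [4, 5, -6], [7, 8, 9]]

def Spec_Zadanie_109 (tab : List (List Int)) (out : Int) : Prop := out = Zadanie_109_alt tab
instance (tab : List (List Int)) (out : Int) : Decidable (Spec_Zadanie_109 tab out) := by unfold Spec_Zadanie_109; infer_instance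

-- ===== CLAIM (what is proved, stated in full; the proofs are below) =====
def Claim_equal_Zadanie_109 : Prop := ∀ (tab : List (List Int)), Dom_Zadanie_109 tab → Pre_Zadanie_109 tab → Spec_Zadanie_109 tab (Zadanie_109 tab)

-- ===== LEMMAS AND PROOFS =====

-- total cell access (both ports read cells through pyGetD with default 0)
def pvG (tab : List (List Int)) (r c : Nat) : Int := (tab.getD r []).getD c 0

-- sum of the window of length c starting at s of the line j ↦ f j
def pvWsum (f : Nat → Int) (s c : Nat) : Int := ((List.range c).map (fun j => f (s + j))).sum

-- the candidate sums contributed by one line of length m (windows of length 2..11)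
def pvLineCand (f : Nat → Int) (m : Nat) : List Int :=
  (List.range m).flatMap (fun s => (List.range 10).flatMap (fun k =>
    if s + (k + 1) < m then [pvWsum f s (k + 2)] else []))

-- A's candidates in A's enumeration order (vertical then horizontal per (y,x,i))
def pvCandA (tab : List (List Int)) : List Int :=
  let m := tab.length
  (List.range m).flatMap (fun y => (List.range m).flatMap (fun x => (List.range 10).flatMap (fun k =>
    (if y + (k + 1) < m then [pvWsum (fun j => pvG tab j x) y (k + 2)] else []) ++
    (if x + (k + 1) < m then [pvWsum (pvG tab y) x (k + 2)] else []))))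

-- B's candidates: all rows, then all columns
def pvCandB (tab : List (List Int)) : List Int :=
  let m := tab.length
  (List.range m).flatMap (fun y => pvLineCand (pvG tab y) m) ++
  (List.range m).flatMap (fun x => pvLineCand (fun j => pvG tab j x) m)

theorem pv_foldl_max_flatMap {α : Type} (l : List α) (f : α → List Int) (a : Int) :
    l.foldl (fun r t => (f t).foldl max r) a = (l.flatMap f).foldl max a := by
  induction l generalizing a with
  | nil => rfl
  | cons x l ih => simp [List.flatMap_cons, List.foldl_append, ih]

theorem pv_perm_flatMap_append {α : Type} (l : List α) (f g : α → List Int) :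
    (l.flatMap (fun t => f t ++ g t)).Perm (l.flatMap f ++ l.flatMap g) := by
  induction l with
  | nil => rfl
  | cons x l ih =>
    simp only [List.flatMap_cons, List.append_assoc]
    exact ((ih.append_left _).append_left _).trans ((List.perm_append_comm_assoc _ _ _).append_left _)

theorem pv_perm_flatMap_congr {α : Type} (l : List α) (f g : α → List Int)
    (h : ∀ a ∈ l, (f a).Perm (g a)) : (l.flatMap f).Perm (l.flatMap g) := by
  induction l with
  | nil => rfl
  | cons x l ih =>
    simp only [List.flatMap_cons]
    exact (h x (by simp)).append (ih (fun a ha => h a (by simp [ha])))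

theorem pv_perm_flatMap_comm {α β : Type} (l1 : List α) (l2 : List β) (h : α → β → List Int) :
    (l1.flatMap (fun a => l2.flatMap (fun b => h a b))).Perm
      (l2.flatMap (fun b => l1.flatMap (fun a => h a b))) := by
  induction l1 with
  | nil => simp
  | cons a l1 ih =>
    simp only [List.flatMap_cons]
    exact (ih.append_left _).trans (pv_perm_flatMap_append l2 (h a) _).symm

theorem pv_perm_split {α β : Type} (l : List α) (r : List β) (f g : α → β → List Int) :
    (l.flatMap (fun a => r.flatMap (fun b => f a b ++ g a b))).Perm
      ((l.flatMap (fun a => r.flatMap (f a))) ++ (l.flatMap (fun a => r.flatMap (g a)))) :=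
  (pv_perm_flatMap_congr l _ _ (fun a _ => pv_perm_flatMap_append r (f a) (g a))).trans
    (pv_perm_flatMap_append l _ _)

theorem pv_perm_candA_candB (tab : List (List Int)) : (pvCandA tab).Perm (pvCandB tab) := by
  simp only [pvCandA, pvCandB, pvLineCand]
  refine ((pv_perm_flatMap_congr _ _ _ (fun y _ =>
      pv_perm_split (List.range tab.length) (List.range 10) _ _)).trans
      (pv_perm_flatMap_append _ _ _)).trans ?_
  refine List.perm_append_comm.trans ?_
  exact (List.Perm.refl _).append (pv_perm_flatMap_comm _ _ _)

theorem pv_window_sum (v : Int → Int) (a : Int) (c : Nat) :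
    (PySem.List.pyRange a (a + (c : Int)) 1).foldl (fun s j => s + v j) 0
      = ((List.range c).map (fun t : Nat => v (a + (t : Int)))).sum := by
  rw [PySem.List.foldl_add, PySem.List.pyRange_one, List.map_map]
  have hc : ((a + (c : Int)) - a).toNat = c := by omega
  rw [hc, zero_add]; rfl

theorem pv_loop_to_flatMap (m : Nat) (body : Int → Int → Int) (F : Nat → List Int)
    (h : ∀ (r : Int) (y : Nat), y < m → body r (y : Int) = (F y).foldl max r) (r : Int) :
    (PySem.List.pyRange 0 (m : Int) 1).foldl body r = ((List.range m).flatMap F).foldl max r := by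
  rw [PySem.List.pyRange_zero_natCast, List.foldl_map, ← pv_foldl_max_flatMap]
  exact PySem.List.foldl_congr_mem _ _ _ _ (fun acc y hy => h acc y (List.mem_range.mp hy))

theorem pv_iloop_to_flatMap (body : Int → Int → Int) (F : Nat → List Int)
    (h : ∀ (r : Int) (k : Nat), k < 10 → body r (1 + (k : Int)) = (F k).foldl max r) (r : Int) :
    (PySem.List.pyRange 1 11 1).foldl body r = ((List.range 10).flatMap F).foldl max r := by
  have h10 : PySem.List.pyRange 1 11 1 = (List.range 10).map (fun k : Nat => 1 + (k : Int)) := by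
    rw [PySem.List.pyRange_one]; rfl
  rw [h10, List.foldl_map, ← pv_foldl_max_flatMap]
  exact PySem.List.foldl_congr_mem _ _ _ _ (fun acc k hk => h acc k (List.mem_range.mp hk))

theorem pv_A_vertical (tab : List (List Int)) (y x k : Nat) :
    (PySem.List.pyRange (y : Int) (1 + (k : Int) + (y : Int) + 1) 1).foldl
        (fun suma j => suma + PySem.List.pyGetD (PySem.List.pyGetD tab j []) (x : Int) 0) 0
      = pvWsum (fun j => pvG tab j x) y (k + 2) := by
  have harg : (1 + (k : Int) + (y : Int) + 1) = (y : Int) + ((k + 2 : Nat) : Int) := by push_cast; ring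
  rw [harg, pv_window_sum]
  unfold pvWsum pvG
  refine congrArg List.sum (List.map_congr_left (fun t _ => ?_))
  have : (y : Int) + (t : Int) = ((y + t : Nat) : Int) := by push_cast; ring
  rw [this, PySem.List.pyGetD_natCast, PySem.List.pyGetD_natCast]

theorem pv_A_horizontal (tab : List (List Int)) (y x k : Nat) :
    (PySem.List.pyRange (x : Int) (1 + (k : Int) + (x : Int) + 1) 1).foldl
        (fun suma j => suma + PySem.List.pyGetD (PySem.List.pyGetD tab (y : Int) []) j 0) 0
      = pvWsum (pvG tab y) x (k + 2) := by
  have harg : (1 + (k : Int) + (x : Int) + 1) = (x : Int) + ((k + 2 : Nat) : Int) := by push_cast; ring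
  rw [harg, pv_window_sum]
  unfold pvWsum pvG
  refine congrArg List.sum (List.map_congr_left (fun t _ => ?_))
  have : (x : Int) + (t : Int) = ((x + t : Nat) : Int) := by push_cast; ring
  rw [this, PySem.List.pyGetD_natCast, PySem.List.pyGetD_natCast]

theorem pv_A_inner (tab : List (List Int)) (y x : Nat) (r : Int) (k : Nat) :
    (let res1 := if 1 + (k : Int) + (y : Int) < (tab.length : Int) then
        max r ((PySem.List.pyRange (y : Int) (1 + (k : Int) + (y : Int) + 1) 1).foldl
          (fun suma j => suma + PySem.List.pyGetD (PySem.List.pyGetD tab j []) (x : Int) 0) 0)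
      else r
     if 1 + (k : Int) + (x : Int) < (tab.length : Int) then
        max res1 ((PySem.List.pyRange (x : Int) (1 + (k : Int) + (x : Int) + 1) 1).foldl
          (fun suma j => suma + PySem.List.pyGetD (PySem.List.pyGetD tab (y : Int) []) j 0) 0)
      else res1)
    = ((if y + (k + 1) < tab.length then [pvWsum (fun j => pvG tab j x) y (k + 2)] else []) ++
       (if x + (k + 1) < tab.length then [pvWsum (pvG tab y) x (k + 2)] else [])).foldl max r := by
  have hVc : (1 + (k : Int) + (y : Int) < (tab.length : Int)) ↔ y + (k + 1) < tab.length := by omega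
  have hHc : (1 + (k : Int) + (x : Int) < (tab.length : Int)) ↔ x + (k + 1) < tab.length := by omega
  rw [pv_A_vertical, pv_A_horizontal]
  by_cases hV : y + (k + 1) < tab.length <;> by_cases hH : x + (k + 1) < tab.length <;>
    simp [hVc.mpr, hHc.mpr, hV, hH, hVc, hHc, List.foldl]

theorem pv_A_eq_fold (tab : List (List Int)) :
    Zadanie_109 tab = (pvCandA tab).foldl max 0 := by
  simp only [Zadanie_109, pvCandA]
  refine pv_loop_to_flatMap _ _ _ (fun r y hy => ?_) 0
  refine pv_loop_to_flatMap _ _ _ (fun r2 x hx => ?_) r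
  refine pv_iloop_to_flatMap _ _ (fun r3 k hk => ?_) r2
  exact pv_A_inner tab y x r3 k

theorem pv_pref_char (line : List Int) :
    line.foldl (fun pref v => pref ++ [PySem.List.pyGetD pref (-1) 0 + v]) [0]
      = (List.range (line.length + 1)).map (fun t => (line.take t).sum) := by
  induction line using List.reverseRecOn with
  | nil => simp
  | append_singleton l v ih =>
    rw [List.foldl_append, ih, List.foldl_cons, List.foldl_nil]
    have hlen : (l ++ [v]).length = l.length + 1 := by simp
    rw [hlen]
    have hP : (List.range (l.length + 1)).map (fun t => (l.take t).sum)
        = (List.range l.length).map (fun t => (l.take t).sum) ++ [(l.take l.length).sum] := by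
      rw [List.range_succ, List.map_append]; rfl
    have hlast : PySem.List.pyGetD ((List.range (l.length + 1)).map (fun t => (l.take t).sum)) (-1) 0
        = l.sum := by
      rw [hP, PySem.List.pyGetD_neg_one_append_singleton, List.take_length]
    rw [hlast, List.range_succ (n := l.length + 1), List.map_append]
    congr 1
    · refine List.map_congr_left (fun t ht => ?_)
      have ht' : t ≤ l.length := by
        have := List.mem_range.mp ht; omega
      rw [List.take_append_of_le_length ht']
    · have : (l ++ [v]).take (l.length + 1) = l ++ [v] := by
        apply List.take_of_length_le; simp
      simp [this, List.sum_append]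

theorem pv_take_diff (f : Nat → Int) (m s c : Nat) (h : s + c ≤ m) :
    (((List.range m).map f).take (s + c)).sum - (((List.range m).map f).take s).sum
      = pvWsum f s c := by
  rw [← List.map_take, List.take_range, ← List.map_take, List.take_range,
    Nat.min_eq_left h, Nat.min_eq_left (by omega), List.range_add, List.map_append,
    List.sum_append, List.map_map, add_sub_cancel_left]
  rfl

theorem pv_line_loop (f : Nat → Int) (m : Nat) (r : Int) :
    (PySem.List.pyRange 0 (m : Int) 1).foldl (fun best s =>
      (PySem.List.pyRange 1 11 1).foldl (fun best i =>
        if s + i < (m : Int) then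
          max best (PySem.List.pyGetD (((List.range m).map f).foldl
              (fun pref v => pref ++ [PySem.List.pyGetD pref (-1) 0 + v]) [0]) (s + i + 1) 0
            - PySem.List.pyGetD (((List.range m).map f).foldl
              (fun pref v => pref ++ [PySem.List.pyGetD pref (-1) 0 + v]) [0]) s 0)
        else best) best) r
    = (pvLineCand f m).foldl max r := by
  simp only [pvLineCand]
  refine pv_loop_to_flatMap m _ _ (fun r1 s hs => ?_) r
  refine pv_iloop_to_flatMap _ _ (fun r2 k hk => ?_) r1
  have hcond : ((s : Int) + (1 + (k : Int)) < (m : Int)) ↔ s + (k + 1) < m := by omega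
  by_cases h : s + (k + 1) < m
  · rw [if_pos (hcond.mpr h), if_pos h]
    have hpref := pv_pref_char ((List.range m).map f)
    have hlen : ((List.range m).map f).length = m := by simp
    rw [hlen] at hpref
    have hidx1 : ((s : Int) + (1 + (k : Int)) + 1) = ((s + (k + 2) : Nat) : Int) := by push_cast; ring
    rw [hpref, hidx1, PySem.List.pyGetD_natCast, PySem.List.pyGetD_natCast,
      PySem.List.getD_map_range _ _ _ _ (by omega), PySem.List.getD_map_range _ _ _ _ (by omega),
      pv_take_diff f m s (k + 2) (by omega)]
    simp [List.foldl]
  · rw [if_neg (fun hc => h (hcond.mp hc)), if_neg h]; rfl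

theorem pv_lines_fold (m : Nat) (g : Nat → Nat → Int) (r : Int) :
    (List.range m).foldl (fun best y =>
      (PySem.List.pyRange 0 (m : Int) 1).foldl (fun best s =>
        (PySem.List.pyRange 1 11 1).foldl (fun best i =>
          if s + i < (m : Int) then
            max best (PySem.List.pyGetD (((List.range m).map (g y)).foldl
                (fun pref v => pref ++ [PySem.List.pyGetD pref (-1) 0 + v]) [0]) (s + i + 1) 0
              - PySem.List.pyGetD (((List.range m).map (g y)).foldl
                (fun pref v => pref ++ [PySem.List.pyGetD pref (-1) 0 + v]) [0]) s 0)
          else best) best) best) r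
    = ((List.range m).flatMap (fun y => pvLineCand (g y) m)).foldl max r := by
  rw [← pv_foldl_max_flatMap]
  exact PySem.List.foldl_congr_mem _ _ _ _ (fun acc y _ => pv_line_loop (g y) m acc)

theorem pv_B_eq_fold (tab : List (List Int)) :
    Zadanie_109_alt tab = (pvCandB tab).foldl max 0 := by
  simp only [Zadanie_109_alt, pvCandB]
  have hrows : (PySem.List.pyRange 0 (tab.length : Int) 1).map (fun y =>
        (PySem.List.pyRange 0 (tab.length : Int) 1).map (fun x =>
          PySem.List.pyGetD (PySem.List.pyGetD tab y []) x 0))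
      = (List.range tab.length).map (fun y => (List.range tab.length).map (pvG tab y)) := by
    rw [PySem.List.pyRange_zero_natCast, List.map_map]
    refine List.map_congr_left (fun y _ => ?_)
    simp only [Function.comp_apply, List.map_map]
    refine List.map_congr_left (fun x _ => ?_)
    simp [pvG, Function.comp, PySem.List.pyGetD_natCast]
  have hcols : (PySem.List.pyRange 0 (tab.length : Int) 1).map (fun x =>
        (PySem.List.pyRange 0 (tab.length : Int) 1).map (fun y =>
          PySem.List.pyGetD (PySem.List.pyGetD tab y []) x 0))
      = (List.range tab.length).map (fun x => (List.range tab.length).map (fun y => pvG tab y x)) := by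
    rw [PySem.List.pyRange_zero_natCast, List.map_map]
    refine List.map_congr_left (fun x _ => ?_)
    simp only [Function.comp_apply, List.map_map]
    refine List.map_congr_left (fun y _ => ?_)
    simp [pvG, Function.comp, PySem.List.pyGetD_natCast]
  rw [hrows, hcols, List.foldl_append, List.foldl_map, List.foldl_map,
    pv_lines_fold tab.length (pvG tab), pv_lines_fold tab.length (fun x j => pvG tab j x),
    List.foldl_append]

-- ===== VERDICT (by name: the statement is the Claim_ definition above) =====
theorem Zadanie_109_spec : Claim_equal_Zadanie_109 := by
  intro tab _ _
  unfold Spec_Zadanie_109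
  rw [pv_A_eq_fold, pv_B_eq_fold]
  exact (pv_perm_candA_candB tab).foldl_eq 0
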